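-- pv_equiv track=rewrite | github.com/berenickt/Practice-CodingTest-Python | progammers-training/d06-27-수_조작하기1-181926.py | solution1
-- ===== SOURCE A (Python) =====
-- def solution1(n, control):
--     for c in control:
--         if c == "w":
--             n += 1
--         elif c == "s":
--             n -= 1
--         elif c == "d":
--             n += 10
--         else:
--             n -= 10
--     return n
-- ===== SOURCE B (Python) =====
-- def solution1(n, control):
--     w = control.count("w")
--     s = control.count("s")
--     d = control.count("d")
--     rest = len(control) - w - s - d
--     return n + w - s + 10 * d - 10 * rest
-- ===== Notes on version B (the rewrite author's own statement) =====
-- stated objective: simpler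
-- what changed: Replaced the per-character branching loop with a count-then-closed-formula decomposition: count 'w', 's', 'd' occurrences, treat the remainder of len(control) as the -10 bucket, and return one arithmetic expression.
import Mathlib
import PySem

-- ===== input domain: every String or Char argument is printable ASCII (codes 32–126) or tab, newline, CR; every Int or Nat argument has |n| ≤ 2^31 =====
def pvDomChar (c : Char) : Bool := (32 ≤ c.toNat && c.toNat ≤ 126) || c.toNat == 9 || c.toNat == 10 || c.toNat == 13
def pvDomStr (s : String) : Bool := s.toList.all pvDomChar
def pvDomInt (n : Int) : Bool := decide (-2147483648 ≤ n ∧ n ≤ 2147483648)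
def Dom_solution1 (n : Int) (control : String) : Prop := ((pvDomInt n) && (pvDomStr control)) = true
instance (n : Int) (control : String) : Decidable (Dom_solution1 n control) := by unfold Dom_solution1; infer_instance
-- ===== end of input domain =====

-- B replaces A's per-character branching loop by counting 'w'/'s'/'d' once and returning one
-- closed-form arithmetic expression (objective: simpler).

-- ===== PORT A =====
-- per-character loop with the same branch chain as the Python
def solution1 (n : Int) (control : String) : Int :=
  control.toList.foldl
    (fun n c =>
      if c == 'w' then n + 1
      else if c == 's' then n - 1
      else if c == 'd' then n + 10
      else n - 10) n

-- ===== PORT B =====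
-- control.count("w") for a single-character pattern is exactly the character count
def solution1_alt (n : Int) (control : String) : Int :=
  let w : Int := control.toList.count 'w'
  let s : Int := control.toList.count 's'
  let d : Int := control.toList.count 'd'
  let rest : Int := PySem.Str.len control - w - s - d
  n + w - s + 10 * d - 10 * rest

-- ===== PRECONDITION & SPEC =====
def Spec_solution1 (n : Int) (control : String) (out : Int) : Prop := out = solution1_alt n control
instance (n : Int) (control : String) (out : Int) : Decidable (Spec_solution1 n control out) := by unfold Spec_solution1; infer_instance

-- ===== CLAIM (what is proved, stated in full; the proofs are below) =====
def Claim_equal_solution1 : Prop := ∀ (n : Int) (control : String), Dom_solution1 n control → Spec_solution1 n control (solution1 n control)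

-- ===== LEMMAS AND PROOFS =====
theorem solution1_foldl_eq (l : List Char) (n : Int) :
    l.foldl
      (fun n c =>
        if c == 'w' then n + 1
        else if c == 's' then n - 1
        else if c == 'd' then n + 10
        else n - 10) n
    = n + l.count 'w' - l.count 's' + 10 * (l.count 'd')
        - 10 * ((l.length : Int) - l.count 'w' - l.count 's' - l.count 'd') := by
  induction l generalizing n with
  | nil => simp
  | cons c l ih =>
    simp only [List.foldl_cons, ih, List.count_cons, List.length_cons]
    by_cases hw : c = 'w' <;> by_cases hs : c = 's' <;> by_cases hd : c = 'd' <;>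
      simp_all <;> ring

-- ===== VERDICT (by name: the statement is the Claim_ definition above) =====
theorem solution1_spec : Claim_equal_solution1 := by
  intro n control _
  unfold Spec_solution1 solution1 solution1_alt
  simp only [PySem.Str.len_eq, solution1_foldl_eq]
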